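-- pv_equiv track=rewrite | github.com/raeez/chiral-bar-cobar | compute/lib/modular_periodicity_bar_cohomology.py | first_nontrivial_null
-- ===== SOURCE A (Python) =====
-- def _null_levels_A(p: int, q: int, r: int, s: int, n: int) -> int:
--     """Null vector level A(n) = 4pq*n^2 + 2n*(qr-ps)."""
--     return 4 * p * q * n * n + 2 * n * (q * r - p * s)
--
-- def _null_levels_B(p: int, q: int, r: int, s: int, n: int) -> int:
--     """Null vector level B(n) = 4pq*n^2 + 2n*(qr+ps) + rs."""
--     return 4 * p * q * n * n + 2 * n * (q * r + p * s) + r * s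
--
-- def first_nontrivial_null(p: int, q: int, r: int = 1, s: int = 1) -> int:
--     """First null vector level beyond the L_{-1} null for module V_{r,s}.
--
--     For the vacuum (r=s=1), the L_{-1} null is at level B(0) = rs = 1.
--     The next null comes from B(-1) = 4pq - 2(q+p) + 1 or A(-1) = 4pq - 2(q-p).
--     Returns the level of the second-smallest positive null.
--     """
--     nulls = set()
--     bound = 10
--     for n in range(-bound, bound + 1):
--         a = _null_levels_A(p, q, r, s, n)
--         if a > 0:
--             nulls.add(a)
--         b = _null_levels_B(p, q, r, s, n)
--         if b > 0:
--             nulls.add(b)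
--     sorted_nulls = sorted(nulls)
--     # The first null at level rs (for vacuum, level 1) is the L_{-1} null.
--     # Return the second one.
--     if len(sorted_nulls) >= 2:
--         return sorted_nulls[1]
--     return sorted_nulls[0] if sorted_nulls else 0
-- ===== SOURCE B (Python) =====
-- def _null_levels_A(p: int, q: int, r: int, s: int, n: int) -> int:
--     """Null vector level A(n) = 4pq*n^2 + 2n*(qr-ps)."""
--     return 4 * p * q * n * n + 2 * n * (q * r - p * s)
--
-- def _null_levels_B(p: int, q: int, r: int, s: int, n: int) -> int:
--     """Null vector level B(n) = 4pq*n^2 + 2n*(qr+ps) + rs."""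
--     return 4 * p * q * n * n + 2 * n * (q * r + p * s) + r * s
--
-- def first_nontrivial_null(p: int, q: int, r: int = 1, s: int = 1) -> int:
--     """Second-smallest distinct positive null level, by a single-pass
--     two-minimum selection instead of building a set and sorting it."""
--     min1 = None
--     min2 = None
--     for n in range(-10, 11):
--         for v in (_null_levels_A(p, q, r, s, n), _null_levels_B(p, q, r, s, n)):
--             if v <= 0:
--                 continue
--             if min1 is None:
--                 min1 = v
--             elif v < min1:
--                 min1, min2 = v, min1
--             elif v == min1:
--                 pass  # duplicate of the current minimum: set-dedup ignores it
--             elif min2 is None or v < min2: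
--                 min2 = v
--     if min2 is not None:
--         return min2
--     if min1 is not None:
--         return min1
--     return 0
-- ===== Notes on version B (the rewrite author's own statement) =====
-- stated objective: alternative
-- what changed: Replaces 'accumulate candidates into a set, sort it, index [1]' by a single pass over the same 21 loop iterations that maintains the smallest and second-smallest distinct positive candidates in two running accumulators, with no set and no sort.
import Mathlib
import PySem

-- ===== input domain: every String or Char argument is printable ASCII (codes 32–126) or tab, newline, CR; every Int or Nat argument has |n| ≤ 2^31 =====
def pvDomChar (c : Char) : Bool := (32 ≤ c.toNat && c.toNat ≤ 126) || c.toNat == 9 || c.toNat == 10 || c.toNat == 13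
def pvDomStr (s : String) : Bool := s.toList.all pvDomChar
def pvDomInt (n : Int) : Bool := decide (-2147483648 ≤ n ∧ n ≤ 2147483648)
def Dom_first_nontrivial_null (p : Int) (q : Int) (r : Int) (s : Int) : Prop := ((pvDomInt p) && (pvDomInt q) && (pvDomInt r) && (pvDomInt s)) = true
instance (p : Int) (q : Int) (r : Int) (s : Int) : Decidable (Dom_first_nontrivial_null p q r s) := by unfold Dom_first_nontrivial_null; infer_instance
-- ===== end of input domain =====

-- B replaces A's "collect positives into a set, sort, take the second" by a single pass
-- keeping the two smallest distinct positive candidates (objective: alternative, same cost class).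

-- ===== PORT A =====
def pvLevelA (p q r s n : Int) : Int := 4 * p * q * n * n + 2 * n * (q * r - p * s)
def pvLevelB (p q r s n : Int) : Int := 4 * p * q * n * n + 2 * n * (q * r + p * s) + r * s

def first_nontrivial_null (p : Int) (q : Int) (r : Int) (s : Int) : Int :=
  let nulls : PySem.Set Int :=
    (PySem.List.pyRange (-10) (10 + 1) 1).foldl (fun nulls n =>
      let a := pvLevelA p q r s n
      let nulls := if a > 0 then PySem.Set.add nulls a else nulls
      let b := pvLevelB p q r s n
      if b > 0 then PySem.Set.add nulls b else nulls) PySem.Set.empty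
  let sorted_nulls := PySem.List.sorted nulls (fun x => x)
  if 2 ≤ sorted_nulls.length then PySem.List.pyGetD sorted_nulls 1 0
  else if sorted_nulls ≠ [] then PySem.List.pyGetD sorted_nulls 0 0
  else 0

-- ===== PORT B =====
-- one update of the (min1, min2) pair with a positive-candidate check, as in Source B
def pvStep (st : Option Int × Option Int) (v : Int) : Option Int × Option Int :=
  if v ≤ 0 then st
  else
    match st with
    | (none, _) => (some v, none)
    | (some m1, m2) =>
      if v < m1 then (some v, some m1)
      else if v = m1 then (some m1, m2)
      else
        match m2 with
        | none => (some m1, some v)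
        | some m2v => if v < m2v then (some m1, some v) else (some m1, some m2v)

def first_nontrivial_null_alt (p : Int) (q : Int) (r : Int) (s : Int) : Int :=
  let st := (PySem.List.pyRange (-10) (10 + 1) 1).foldl
    (fun st n => pvStep (pvStep st (pvLevelA p q r s n)) (pvLevelB p q r s n))
    ((none, none) : Option Int × Option Int)
  match st with
  | (_, some m2) => m2
  | (some m1, none) => m1
  | (none, none) => 0

-- ===== PRECONDITION & SPEC =====
def Spec_first_nontrivial_null (p : Int) (q : Int) (r : Int) (s : Int) (out : Int) : Prop := out = first_nontrivial_null_alt p q r s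
instance (p : Int) (q : Int) (r : Int) (s : Int) (out : Int) : Decidable (Spec_first_nontrivial_null p q r s out) := by unfold Spec_first_nontrivial_null; infer_instance

-- ===== CLAIM (what is proved, stated in full; the proofs are below) =====
def Claim_equal_first_nontrivial_null : Prop := ∀ (p : Int) (q : Int) (r : Int) (s : Int), Dom_first_nontrivial_null p q r s → Spec_first_nontrivial_null p q r s (first_nontrivial_null p q r s)

-- ===== LEMMAS AND PROOFS =====

-- invariant tying A's set of positive candidates to B's (min1, min2) state
def pvInv (s : List Int) (st : Option Int × Option Int) : Prop :=
  s.Nodup ∧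
  match st with
  | (none, none) => s = []
  | (none, some _) => False
  | (some m1, none) => s = [m1]
  | (some m1, some m2) =>
      m1 ∈ s ∧ m2 ∈ s ∧ m1 < m2 ∧ (∀ y ∈ s, m1 ≤ y) ∧ (∀ y ∈ s, y ≠ m1 → m2 ≤ y)

-- B's final read-out of the (min1, min2) state, as a named function for the lemmas
def pvOut (st : Option Int × Option Int) : Int :=
  match st with
  | (_, some m2) => m2
  | (some m1, none) => m1
  | (none, none) => 0

theorem pvStep_inv (s : List Int) (st : Option Int × Option Int) (v : Int)
    (h : pvInv s st) :
    pvInv (if v > 0 then PySem.Set.add s v else s) (pvStep st v) := by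
  by_cases hv : v ≤ 0
  · have hv2 : ¬ v > 0 := by omega
    simp only [pvStep, if_pos hv, if_neg hv2]
    exact h
  · have hv' : v > 0 := by omega
    rcases st with ⟨_ | m1, _ | m2⟩ <;> obtain ⟨hnd, hm⟩ := h
    · -- state (none, none): no positive seen yet
      replace hm : s = [] := hm
      subst hm
      simp only [pvStep, if_neg hv, if_pos hv']
      rw [PySem.Set.add_of_not_mem (by simp)]
      exact ⟨by simp, rfl⟩
    · exact absurd hm (by exact fun h => h)
    · -- state (some m1, none): exactly one distinct positive, s = [m1]
      replace hm : s = [m1] := hm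
      subst hm
      simp only [pvStep, if_neg hv, if_pos hv']
      by_cases h1 : v < m1
      · rw [if_pos h1, PySem.Set.add_of_not_mem (by simp; omega)]
        refine ⟨by simp; omega, by simp, by simp, h1, ?_, ?_⟩
        · intro y hy; simp at hy; omega
        · intro y hy _; simp at hy; omega
      · by_cases h2 : v = m1
        · rw [if_neg h1, if_pos h2, h2, PySem.Set.add_of_mem (by simp)]
          exact ⟨hnd, rfl⟩
        · have h3 : m1 < v := by omega
          rw [if_neg h1, if_neg h2, PySem.Set.add_of_not_mem (by simp; omega)]
          refine ⟨by simp; omega, by simp, by simp, h3, ?_, ?_⟩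
          · intro y hy; simp at hy; omega
          · intro y hy hne; simp at hy; omega
    · -- state (some m1, some m2): two distinct positives tracked
      replace hm : m1 ∈ s ∧ m2 ∈ s ∧ m1 < m2 ∧ (∀ y ∈ s, m1 ≤ y) ∧ (∀ y ∈ s, y ≠ m1 → m2 ≤ y) := hm
      obtain ⟨hm1, hm2, hlt, hmin, hsec⟩ := hm
      simp only [pvStep, if_neg hv, if_pos hv']
      by_cases h1 : v < m1
      · rw [if_pos h1]
        refine ⟨PySem.Set.nodup_add s v hnd, (PySem.Set.mem_add s v _).mpr (Or.inr rfl),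
          (PySem.Set.mem_add s v _).mpr (Or.inl hm1), h1, ?_, ?_⟩
        · intro y hy; rcases (PySem.Set.mem_add s v _).mp hy with h | h
          · have := hmin y h; omega
          · omega
        · intro y hy hne; rcases (PySem.Set.mem_add s v _).mp hy with h | h
          · have := hmin y h; omega
          · omega
      · by_cases h2 : v = m1
        · rw [if_neg h1, if_pos h2, h2, PySem.Set.add_of_mem hm1]
          exact ⟨hnd, hm1, hm2, hlt, hmin, hsec⟩
        · by_cases h4 : v < m2
          · rw [if_neg h1, if_neg h2, if_pos h4]
            refine ⟨PySem.Set.nodup_add s v hnd, (PySem.Set.mem_add s v _).mpr (Or.inl hm1),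
              (PySem.Set.mem_add s v _).mpr (Or.inr rfl), by omega, ?_, ?_⟩
            · intro y hy; rcases (PySem.Set.mem_add s v _).mp hy with h | h
              · exact hmin y h
              · omega
            · intro y hy hne; rcases (PySem.Set.mem_add s v _).mp hy with h | h
              · have := hsec y h hne; omega
              · omega
          · rw [if_neg h1, if_neg h2, if_neg h4]
            refine ⟨PySem.Set.nodup_add s v hnd, (PySem.Set.mem_add s v _).mpr (Or.inl hm1),
              (PySem.Set.mem_add s v _).mpr (Or.inl hm2), hlt, ?_, ?_⟩
            · intro y hy; rcases (PySem.Set.mem_add s v _).mp hy with h | h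
              · exact hmin y h
              · omega
            · intro y hy hne; rcases (PySem.Set.mem_add s v _).mp hy with h | h
              · exact hsec y h hne
              · omega

theorem pvFold_inv (p q r s : Int) (l : List Int) (acc : PySem.Set Int)
    (st : Option Int × Option Int) (h : pvInv acc st) :
    pvInv
      (l.foldl (fun nulls n =>
        let a := pvLevelA p q r s n
        let nulls := if a > 0 then PySem.Set.add nulls a else nulls
        let b := pvLevelB p q r s n
        if b > 0 then PySem.Set.add nulls b else nulls) acc)
      (l.foldl (fun st n => pvStep (pvStep st (pvLevelA p q r s n)) (pvLevelB p q r s n)) st) := by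
  induction l generalizing acc st with
  | nil => exact h
  | cons n t ih =>
      exact ih _ _ (pvStep_inv _ _ _ (pvStep_inv _ _ _ h))

theorem pvExtract (s : List Int) (st : Option Int × Option Int) (h : pvInv s st) :
    (if 2 ≤ (PySem.List.sorted s (fun x => x)).length then
       PySem.List.pyGetD (PySem.List.sorted s (fun x => x)) 1 0
     else if (PySem.List.sorted s (fun x => x)) ≠ [] then
       PySem.List.pyGetD (PySem.List.sorted s (fun x => x)) 0 0
     else 0)
    = pvOut st := by
  rcases st with ⟨_ | m1, _ | m2⟩ <;> obtain ⟨hnd, hm⟩ := h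
  · replace hm : s = [] := hm
    subst hm; rfl
  · exact absurd hm (by exact fun h => h)
  · replace hm : s = [m1] := hm
    subst hm
    rw [PySem.List.sorted_eq_self_of_pairwise [m1] (fun x => x) (by simp)]
    rfl
  · replace hm : m1 ∈ s ∧ m2 ∈ s ∧ m1 < m2 ∧ (∀ y ∈ s, m1 ≤ y) ∧ (∀ y ∈ s, y ≠ m1 → m2 ≤ y) := hm
    obtain ⟨hm1, hm2, hlt, hmin, hsec⟩ := hm
    set t := PySem.List.sorted s (fun x : Int => x) with ht
    have hperm : t.Perm s := PySem.List.sorted_perm ..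
    have hpair : t.Pairwise (· < ·) := by
      have := PySem.List.sorted_ofList_pairwise_lt (xs := s)
      rwa [PySem.Set.ofList_eq_self_of_nodup s hnd] at this
    have hm1t : m1 ∈ t := hperm.mem_iff.mpr hm1
    have hm2t : m2 ∈ t := hperm.mem_iff.mpr hm2
    match htt : t with
    | [] => simp at hm1t
    | [a] =>
        simp at hm1t hm2t; omega
    | a :: b :: rest =>
        have hamem : a ∈ s := hperm.mem_iff.mp (by simp)
        have hbmem : b ∈ s := hperm.mem_iff.mp (by simp)
        have hab : a < b := (List.pairwise_cons.mp hpair).1 b (by simp)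
        have ha : a = m1 := by
          have h1 := hmin a hamem
          rcases List.mem_cons.mp hm1t with h | h
          · omega
          · have := (List.pairwise_cons.mp hpair).1 m1 h; omega
        have hb : b = m2 := by
          have hbne : b ≠ m1 := by omega
          have h1 := hsec b hbmem hbne
          have hm2tail : m2 ∈ b :: rest := by
            rcases List.mem_cons.mp hm2t with h | h
            · omega
            · exact h
          have hpair' := (List.pairwise_cons.mp hpair).2
          rcases List.mem_cons.mp hm2tail with h | h
          · omega
          · have := (List.pairwise_cons.mp hpair').1 m2 h; omega
        subst ha hb
        rw [if_pos (by simp)]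
        simp [pysem, pvOut]

-- ===== VERDICT (by name: the statement is the Claim_ definition above) =====
theorem first_nontrivial_null_spec : Claim_equal_first_nontrivial_null := by
  intro p q r s _
  unfold Spec_first_nontrivial_null first_nontrivial_null first_nontrivial_null_alt
  exact pvExtract _ _
    (pvFold_inv p q r s (PySem.List.pyRange (-10) (10 + 1) 1) PySem.Set.empty (none, none)
      ⟨List.nodup_nil, rfl⟩)
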